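-- pv_equiv track=rewrite | github.com/eunjuhyun88/WTD_2 | engine/research/validation/sequence.py | _count_monotonic_violations
-- ===== SOURCE A (Python) =====
-- def _count_monotonic_violations(expected: list[str], observed: list[str]) -> int:
--     """Count phases that fall behind the running high-water mark.
--
--     Semantics (PRD W-0222 §6): every observed phase whose index in
--     ``expected`` is strictly less than the maximum index seen so far
--     counts as one violation. This is **not** a transition-based count
--     (each step backwards from peak counts -- once D=3 establishes the
--     high-water mark, B/C/A all count as violations even though B->C is
--     a forward step).
--
--     A repeat of the same phase (cycle / dwell, idx == last_idx) is
--     **not** a violation (W-0222 §10 Q2). Phases not in ``expected``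
--     are ignored. Empty ``expected`` returns ``0``.
--     """
--     if not expected:
--         return 0
--     expected_idx = {phase: idx for idx, phase in enumerate(expected)}
--     last_idx = -1
--     violations = 0
--     for phase in observed:
--         if phase not in expected_idx:
--             continue
--         idx = expected_idx[phase]
--         if idx < last_idx:
--             violations += 1
--         if idx > last_idx:
--             last_idx = idx
--     return violations
-- ===== SOURCE B (Python) =====
-- def _count_monotonic_violations(expected: list[str], observed: list[str]) -> int:
--     """Count observed phases that fall behind the running high-water mark.
--
--     Stateless reformulation: a position is a violation exactly when some
--     strictly earlier observed (and known) phase has a strictly larger index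
--     in ``expected``; no running maximum is maintained.
--     """
--     pos = {phase: idx for idx, phase in enumerate(expected)}
--     idxs = [pos[p] for p in observed if p in pos]
--     return sum(1 for i, x in enumerate(idxs) if any(y > x for y in idxs[:i]))
-- ===== Notes on version B (the rewrite author's own statement) =====
-- stated objective: alternative
-- what changed: Replaces A's fused stateful running-max loop by a stateless two-pass formulation: translate observed phases to an index list, then count positions preceded by some strictly larger index (pairwise any) -- no last_idx state, no empty-expected guard.
import Mathlib
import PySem

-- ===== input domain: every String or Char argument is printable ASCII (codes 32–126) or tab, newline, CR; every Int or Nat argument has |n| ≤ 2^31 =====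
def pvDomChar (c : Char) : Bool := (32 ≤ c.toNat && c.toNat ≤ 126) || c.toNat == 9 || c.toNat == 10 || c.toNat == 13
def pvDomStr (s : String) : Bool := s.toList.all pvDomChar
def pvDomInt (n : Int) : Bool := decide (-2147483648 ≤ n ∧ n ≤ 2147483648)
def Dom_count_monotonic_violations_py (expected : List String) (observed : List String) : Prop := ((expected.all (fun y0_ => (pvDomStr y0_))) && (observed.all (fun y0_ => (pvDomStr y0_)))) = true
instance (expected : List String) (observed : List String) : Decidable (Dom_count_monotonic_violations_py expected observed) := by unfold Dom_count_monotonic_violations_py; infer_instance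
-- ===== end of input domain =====

-- B replaces A's fused stateful running-max loop by a stateless translate-then-pairwise-count formulation (alternative decomposition; not faster).

-- ===== PORT A =====
def count_monotonic_violations_py (expected : List String) (observed : List String) : Int :=
  if expected = [] then 0
  else
    let expected_idx : PySem.Dict String Int :=
      (PySem.List.enumerate expected).foldl (fun d iv => d.insert iv.2 iv.1) PySem.Dict.empty
    (observed.foldl (fun (st : Int × Int) phase =>
      match expected_idx.get? phase with
      | none => st
      | some idx =>
        (if st.1 < idx then idx else st.1, st.2 + (if idx < st.1 then 1 else 0)))
      (-1, 0)).2

-- ===== PORT B =====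
def count_monotonic_violations_py_alt (expected : List String) (observed : List String) : Int :=
  let pos : PySem.Dict String Int :=
    (PySem.List.enumerate expected).foldl (fun d iv => d.insert iv.2 iv.1) PySem.Dict.empty
  let idxs : List Int := observed.filterMap (fun p => pos.get? p)
  (PySem.List.enumerate idxs).foldl
    (fun acc ix =>
      acc + (if (PySem.List.slice idxs none (some ix.1)).any (fun y => decide (ix.2 < y)) then 1 else 0))
    0

-- ===== PRECONDITION & SPEC =====
def Spec_count_monotonic_violations_py (expected : List String) (observed : List String) (out : Int) : Prop := out = count_monotonic_violations_py_alt expected observed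
instance (expected : List String) (observed : List String) (out : Int) : Decidable (Spec_count_monotonic_violations_py expected observed out) := by unfold Spec_count_monotonic_violations_py; infer_instance

-- ===== CLAIM (what is proved, stated in full; the proofs are below) =====
def Claim_equal_count_monotonic_violations_py : Prop := ∀ (expected : List String) (observed : List String), Dom_count_monotonic_violations_py expected observed → Spec_count_monotonic_violations_py expected observed (count_monotonic_violations_py expected observed)

-- ===== LEMMAS AND PROOFS =====

/-- B's violation count in recursive form: `prev` is the already-seen prefix. -/
def pvBCount (prev : List Int) : List Int → Int
  | [] => 0
  | x :: xs => (if prev.any (fun y => decide (x < y)) then 1 else 0) + pvBCount (prev ++ [x]) xs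

/-- `x` is below a running max iff it is below the seed or below some listed element. -/
theorem pv_lt_foldl_max (l : List Int) (a x : Int) :
    x < l.foldl max a ↔ x < a ∨ ∃ y ∈ l, x < y := by
  induction l generalizing a with
  | nil => simp
  | cons y t ih =>
    simp only [List.foldl_cons, ih, lt_max_iff, List.mem_cons]
    constructor
    · rintro (h | h) <;> [tauto; (obtain ⟨z, hz, hlt⟩ := h; exact Or.inr ⟨z, Or.inr hz, hlt⟩)]
    · rintro (h | ⟨z, (rfl | hz), hlt⟩) <;> tauto

/-- Indices produced by `enumerate` are at least the start value. -/
theorem pv_enumerate_fst_le (xs : List String) (s : Int) :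
    ∀ iv ∈ PySem.List.enumerate xs s, s ≤ iv.1 := by
  induction xs generalizing s with
  | nil => simp [PySem.List.enumerate_nil]
  | cons x t ih =>
    rw [PySem.List.enumerate_cons]
    intro iv hiv
    rcases List.mem_cons.mp hiv with h | h
    · simp_all
    · have := ih (s + 1) iv h; omega

/-- Values of the index dict built by inserting nonnegative values stay nonnegative. -/
theorem pv_dict_values_nonneg (l : List (Int × String)) (d0 : PySem.Dict String Int)
    (h0 : ∀ p v, d0.get? p = some v → 0 ≤ v) (hl : ∀ iv ∈ l, 0 ≤ iv.1) :
    ∀ p v, (l.foldl (fun d iv => d.insert iv.2 iv.1) d0).get? p = some v → 0 ≤ v := by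
  induction l generalizing d0 with
  | nil => simpa using h0
  | cons iv t ih =>
    simp only [List.foldl_cons]
    refine ih _ (fun p v hpv => ?_) (fun jv hjv => hl jv (List.mem_cons_of_mem _ hjv))
    by_cases hpk : p = iv.2
    · subst hpk
      rw [PySem.Dict.get?_insert_self] at hpv
      cases hpv
      exact hl iv (List.mem_cons_self ..)
    · rw [PySem.Dict.get?_insert_of_ne _ _ hpk] at hpv
      exact h0 p v hpv

/-- A's loop over `observed`, skipping unknown phases, is a loop over the translated index list. -/
theorem pv_foldA_filterMap (d : PySem.Dict String Int) (obs : List String) (st : Int × Int) :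
    obs.foldl (fun (st : Int × Int) phase =>
        match d.get? phase with
        | none => st
        | some idx =>
          (if st.1 < idx then idx else st.1, st.2 + (if idx < st.1 then 1 else 0))) st
      = (obs.filterMap (fun p => d.get? p)).foldl
          (fun (st : Int × Int) idx =>
            (if st.1 < idx then idx else st.1, st.2 + (if idx < st.1 then 1 else 0))) st := by
  induction obs generalizing st with
  | nil => rfl
  | cons p t ih =>
    cases h : d.get? p <;> simp [h, ih]

/-- A's running-max loop counts exactly B's pairwise violations. -/
theorem pv_foldI_eq_bCount (l prev : List Int) (v : Int) (hl : ∀ x ∈ l, 0 ≤ x) :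
    (l.foldl (fun (st : Int × Int) idx =>
        (if st.1 < idx then idx else st.1, st.2 + (if idx < st.1 then 1 else 0)))
      (prev.foldl max (-1), v)).2 = v + pvBCount prev l := by
  induction l generalizing prev v with
  | nil => simp [pvBCount]
  | cons x t ih =>
    have hx : (0 : Int) ≤ x := hl x (List.mem_cons_self ..)
    have hmax : (if prev.foldl max (-1) < x then x else prev.foldl max (-1))
        = (prev ++ [x]).foldl max (-1) := by
      rw [List.foldl_append]
      simp only [List.foldl_cons, List.foldl_nil]
      rcases lt_or_ge (prev.foldl max (-1)) x with h | h <;> simp [max_def] <;> omega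
    have hcond : (x < prev.foldl max (-1)) ↔ (prev.any (fun y => decide (x < y)) = true) := by
      rw [pv_lt_foldl_max, List.any_eq_true]
      simp only [decide_eq_true_eq]
      constructor
      · rintro (h | h)
        · omega
        · exact h
      · exact Or.inr
    simp only [List.foldl_cons, hmax]
    rw [ih _ (v + if x < prev.foldl max (-1) then 1 else 0)
        (fun y hy => hl y (List.mem_cons_of_mem _ hy))]
    simp only [pvBCount]
    by_cases h : x < prev.foldl max (-1)
    · rw [if_pos h, if_pos (hcond.mp h)]; ring
    · rw [if_neg h, if_neg (fun hb => h (hcond.mpr hb))]; ring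

/-- B's enumerate/slice sum is the recursive pairwise count. -/
theorem pv_foldB_eq_bCount (rest prev : List Int) (acc : Int) :
    (PySem.List.enumerate rest (prev.length : Int)).foldl
        (fun acc ix =>
          acc + (if (PySem.List.slice (prev ++ rest) none (some ix.1)).any
                      (fun y => decide (ix.2 < y)) then 1 else 0)) acc
      = acc + pvBCount prev rest := by
  induction rest generalizing prev acc with
  | nil => simp [PySem.List.enumerate_nil, pvBCount]
  | cons x t ih =>
    rw [PySem.List.enumerate_cons]
    simp only [List.foldl_cons]
    have hslice : PySem.List.slice (prev ++ x :: t) none (some (prev.length : Int))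
        = prev := by
      rw [PySem.List.slice_to_natCast]
      exact List.take_left
    have hlen : (prev.length : Int) + 1 = ((prev ++ [x]).length : Int) := by
      simp [List.length_append]
    have happ : prev ++ x :: t = (prev ++ [x]) ++ t := by simp
    rw [hslice, hlen, happ, ih (prev ++ [x])]
    simp only [pvBCount]
    ring

-- ===== VERDICT (by name: the statement is the Claim_ definition above) =====
theorem count_monotonic_violations_py_spec : Claim_equal_count_monotonic_violations_py := by
  intro expected observed _
  unfold Spec_count_monotonic_violations_py count_monotonic_violations_py
    count_monotonic_violations_py_alt
  by_cases he : expected = []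
  · subst he
    simp [PySem.List.enumerate_nil, PySem.Dict.get?_empty]
  · rw [if_neg he]
    dsimp only
    set d : PySem.Dict String Int :=
      (PySem.List.enumerate expected).foldl (fun d iv => d.insert iv.2 iv.1) PySem.Dict.empty
      with hd
    set idxs : List Int := observed.filterMap (fun p => d.get? p) with hidxs
    have hnn : ∀ x ∈ idxs, (0 : Int) ≤ x := by
      intro x hx
      rw [hidxs] at hx
      obtain ⟨p, _, hp⟩ := List.mem_filterMap.mp hx
      refine pv_dict_values_nonneg _ _ (fun p v h => by rw [PySem.Dict.get?_empty] at h; cases h)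
        (fun iv hiv => pv_enumerate_fst_le expected 0 iv hiv) p x ?_
      rw [hd] at hp; exact hp
    rw [pv_foldA_filterMap]
    have h0 : ((-1 : Int), (0 : Int)) = (([] : List Int).foldl max (-1), (0 : Int)) := rfl
    rw [h0, pv_foldI_eq_bCount idxs [] 0 hnn]
    exact (pv_foldB_eq_bCount idxs [] 0).symm
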